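-- pv_equiv track=rewrite | github.com/hnwyllmm/seekdb | tools/upgrade/upgrade_checker.py | check_is_primary_zone_distributed
-- ===== SOURCE A (Python) =====
-- def check_is_primary_zone_distributed(primary_zone_str):
--   semicolon_pos = len(primary_zone_str)
--   for i in range(len(primary_zone_str)):
--     if primary_zone_str[i] == ';':
--       semicolon_pos = i
--       break
--   comma_pos = len(primary_zone_str)
--   for j in range(len(primary_zone_str)):
--     if primary_zone_str[j] == ',':
--       comma_pos = j
--       break
--   if comma_pos < semicolon_pos:
--     return True
--   else:
--     return False
-- ===== SOURCE B (Python) =====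
-- def check_is_primary_zone_distributed(primary_zone_str):
--   for ch in primary_zone_str:
--     if ch == ',':
--       return True
--     if ch == ';':
--       return False
--   return False
-- ===== Notes on version B (the rewrite author's own statement) =====
-- stated objective: simpler
-- what changed: Replaced the two independent index-based scans (first ';' position, first ',' position) plus a comparison with a single short-circuiting pass that decides on the first delimiter encountered.
import Mathlib
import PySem

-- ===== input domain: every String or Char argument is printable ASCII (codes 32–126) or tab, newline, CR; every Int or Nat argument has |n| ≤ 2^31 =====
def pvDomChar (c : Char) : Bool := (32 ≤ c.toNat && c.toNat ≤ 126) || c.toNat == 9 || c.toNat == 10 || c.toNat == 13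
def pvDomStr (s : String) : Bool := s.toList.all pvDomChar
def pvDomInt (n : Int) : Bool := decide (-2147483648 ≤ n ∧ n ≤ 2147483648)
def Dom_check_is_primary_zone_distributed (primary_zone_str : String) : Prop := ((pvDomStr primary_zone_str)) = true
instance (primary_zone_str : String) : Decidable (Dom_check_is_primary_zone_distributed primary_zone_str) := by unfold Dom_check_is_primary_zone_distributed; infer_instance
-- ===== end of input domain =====

-- B replaces A's two independent first-occurrence scans by a single short-circuiting pass (simpler, same behaviour).


-- ===== PORT A =====
-- first loop / second loop of A: index of the first matching char, else length
def pvScanPos (c : Char) : List Char → Nat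
  | [] => 0
  | x :: xs => if x = c then 0 else pvScanPos c xs + 1

def check_is_primary_zone_distributed (primary_zone_str : String) : Bool :=
  let semicolon_pos := pvScanPos ';' primary_zone_str.toList
  let comma_pos := pvScanPos ',' primary_zone_str.toList
  if comma_pos < semicolon_pos then true else false

-- ===== PORT B =====
-- B: one pass, decide on the first delimiter seen
def pvOnePass : List Char → Bool
  | [] => false
  | ch :: rest => if ch = ',' then true else if ch = ';' then false else pvOnePass rest

def check_is_primary_zone_distributed_alt (primary_zone_str : String) : Bool :=
  pvOnePass primary_zone_str.toList

-- ===== PRECONDITION & SPEC =====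
def Spec_check_is_primary_zone_distributed (primary_zone_str : String) (out : Bool) : Prop := out = check_is_primary_zone_distributed_alt primary_zone_str
instance (primary_zone_str : String) (out : Bool) : Decidable (Spec_check_is_primary_zone_distributed primary_zone_str out) := by unfold Spec_check_is_primary_zone_distributed; infer_instance

-- ===== CLAIM (what is proved, stated in full; the proofs are below) =====
def Claim_equal_check_is_primary_zone_distributed : Prop := ∀ (primary_zone_str : String), Dom_check_is_primary_zone_distributed primary_zone_str → Spec_check_is_primary_zone_distributed primary_zone_str (check_is_primary_zone_distributed primary_zone_str)

-- ===== LEMMAS AND PROOFS =====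

-- ===== VERDICT (by name: the statement is the Claim_ definition above) =====
theorem pvScan_eq_onePass (l : List Char) :
    (decide (pvScanPos ',' l < pvScanPos ';' l)) = pvOnePass l := by
  induction l with
  | nil => simp [pvScanPos, pvOnePass]
  | cons x xs ih =>
    by_cases hc : x = ','
    · simp [pvScanPos, pvOnePass, hc]
    · by_cases hs : x = ';'
      · simp [pvScanPos, pvOnePass, hs]
      · simpa [pvScanPos, pvOnePass, hc, hs] using ih

theorem check_is_primary_zone_distributed_spec : Claim_equal_check_is_primary_zone_distributed := by
  intro s _
  unfold Spec_check_is_primary_zone_distributed check_is_primary_zone_distributed check_is_primary_zone_distributed_alt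
  simpa using pvScan_eq_onePass s.toList
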